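-- pv_equiv track=rewrite | github.com/JuanGraell/P1c | Interfaz.py | createStateMatrix
-- ===== SOURCE A (Python) =====
-- def createStateMatrix(matrix):
--     """
--     Create a state matrix based on the given matrix.
--
--     Args:
--         matrix (list): The input matrix.
--
--     Returns:
--         list: The state matrix.
--     """
--     stateMatrix = []
--     times = 0
--
--     for i in range(len(matrix) - 1, -1, -1):
--         state = []
--         state[len(state):] = [0] * (2 ** i)
--         state[len(state):] = [1] * (2 ** i)
--         temp = state
--         for i in range(times):
--             state[len(state):] = temp
--         stateMatrix.append(state)
--         times += 1
--     return stateMatrix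
-- ===== SOURCE B (Python) =====
-- def createStateMatrix(matrix):
--     n = len(matrix)
--     return [[j // 2**i % 2 for j in range(2**n)] for i in range(n - 1, -1, -1)]
-- ===== Notes on version B (the rewrite author's own statement) =====
-- stated objective: simpler
-- what changed: Replaces the build-then-repeatedly-self-append construction of each row with a closed-form per-element bit formula (row i, column j is (j // 2**i) % 2) over range(2**n).
import Mathlib
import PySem

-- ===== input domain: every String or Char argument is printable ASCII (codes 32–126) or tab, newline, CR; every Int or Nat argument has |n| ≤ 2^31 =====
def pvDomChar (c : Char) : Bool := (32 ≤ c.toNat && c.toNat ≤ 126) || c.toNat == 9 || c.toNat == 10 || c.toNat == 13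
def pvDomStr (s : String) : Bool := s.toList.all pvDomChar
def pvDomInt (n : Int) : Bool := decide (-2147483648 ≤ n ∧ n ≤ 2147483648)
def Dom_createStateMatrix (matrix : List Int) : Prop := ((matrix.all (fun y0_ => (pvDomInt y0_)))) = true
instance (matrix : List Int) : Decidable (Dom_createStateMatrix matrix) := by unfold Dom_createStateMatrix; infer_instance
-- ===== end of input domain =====

-- B replaces A's build-then-repeatedly-self-append row construction with a closed-form
-- per-element formula ((j // 2**i) % 2), a simpler comprehension of the same cost.

-- ===== PORT A =====
-- one outer-loop body: build [0]*2^i ++ [1]*2^i, then append the (aliased) list to itself `times` times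
def pvRowA (i : Int) (times : Nat) : List Int :=
  let state := List.replicate (2 ^ i.toNat) (0 : Int) ++ List.replicate (2 ^ i.toNat) (1 : Int)
  -- `temp = state` aliases, so each `state[len(state):] = temp` doubles the current list
  (List.range times).foldl (fun s _ => s ++ s) state

def createStateMatrix (matrix : List Int) : List (List Int) :=
  ((PySem.List.pyRange ((matrix.length : Int) - 1) (-1) (-1)).foldl
      (fun (p : List (List Int) × Nat) i => (p.1 ++ [pvRowA i p.2], p.2 + 1))
      ([], 0)).1

-- ===== PORT B =====
def createStateMatrix_alt (matrix : List Int) : List (List Int) :=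
  let n := matrix.length
  (PySem.List.pyRange ((n : Int) - 1) (-1) (-1)).map (fun i =>
    (PySem.List.pyRange 0 ((2 : Int) ^ n) 1).map (fun j =>
      PySem.Int.mod (PySem.Int.floordiv j ((2 : Int) ^ i.toNat)) 2))

-- ===== PRECONDITION & SPEC =====
def Spec_createStateMatrix (matrix : List Int) (out : List (List Int)) : Prop := out = createStateMatrix_alt matrix
instance (matrix : List Int) (out : List (List Int)) : Decidable (Spec_createStateMatrix matrix out) := by unfold Spec_createStateMatrix; infer_instance

-- ===== CLAIM (what is proved, stated in full; the proofs are below) =====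
def Claim_equal_createStateMatrix : Prop := ∀ (matrix : List Int), Dom_createStateMatrix matrix → Spec_createStateMatrix matrix (createStateMatrix matrix)

-- ===== LEMMAS AND PROOFS =====

-- closed-form row of B, in Nat terms
def pvG (a j : Nat) : Int := ((j / 2 ^ a) % 2 : Nat)

lemma pvG_period (a c j : Nat) : pvG a (2 ^ (a + 1) * c + j) = pvG a j := by
  unfold pvG
  have h : 2 ^ (a + 1) * c + j = 2 ^ a * (2 * c) + j := by rw [pow_succ]; ac_rfl
  rw [h, Nat.mul_add_div (Nat.pos_of_ne_zero (by positivity)), Nat.add_comm,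
    Nat.add_mul_mod_self_left]

lemma pvG_map_double (a M : Nat) (hM : 2 ^ (a + 1) ∣ M) :
    (List.range (2 * M)).map (pvG a) = (List.range M).map (pvG a) ++ (List.range M).map (pvG a) := by
  obtain ⟨c, rfl⟩ := hM
  rw [two_mul, List.range_add, List.map_append]
  congr 1
  rw [List.map_map]
  apply List.map_congr_left
  intro j _
  simpa using pvG_period a c j

lemma pvG_base (a : Nat) :
    (List.range (2 ^ (a + 1))).map (pvG a) =
      List.replicate (2 ^ a) (0 : Int) ++ List.replicate (2 ^ a) (1 : Int) := by
  rw [pow_succ, mul_two, List.range_add, List.map_append, List.map_map]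
  congr 1
  · rw [List.eq_replicate_iff]
    refine ⟨by simp, ?_⟩
    intro b hb
    simp only [List.mem_map, List.mem_range] at hb
    obtain ⟨j, hj, rfl⟩ := hb
    unfold pvG
    rw [Nat.div_eq_of_lt hj]
    simp
  · rw [List.eq_replicate_iff]
    refine ⟨by simp, ?_⟩
    intro b hb
    simp only [List.mem_map, List.mem_range, Function.comp] at hb
    obtain ⟨j, hj, rfl⟩ := hb
    unfold pvG
    have hpos : 0 < 2 ^ a := Nat.pos_of_ne_zero (by positivity)
    have h1 : (2 ^ a + j) / 2 ^ a = 1 + j / 2 ^ a := by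
      rw [Nat.add_comm, Nat.add_div_right _ hpos, Nat.add_comm]
    have h2 : j / 2 ^ a = 0 := Nat.div_eq_of_lt hj
    rw [h1, h2]; norm_num

lemma pvRowA_eq (a t : Nat) :
    pvRowA (a : Int) t = (List.range (2 ^ (a + 1 + t))).map (pvG a) := by
  induction t with
  | zero => unfold pvRowA; simpa using (pvG_base a).symm
  | succ t ih =>
    unfold pvRowA at *
    rw [List.range_succ, List.foldl_append, ih]
    simp only [List.foldl_cons, List.foldl_nil]
    rw [← pvG_map_double a _ ⟨2 ^ t, by rw [← pow_add]⟩]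
    have h3 : a + 1 + (t + 1) = (a + 1 + t) + 1 := by omega
    rw [h3, pow_succ, Nat.mul_comm]

-- proof-only helper: the list A's fold appends, with the running `times` counter made explicit
def pvGo (l : List Int) (t : Nat) : List (List Int) :=
  match l with
  | [] => []
  | i :: is => pvRowA i t :: pvGo is (t + 1)

lemma pvFoldA (l : List Int) (acc : List (List Int)) (t : Nat) :
    (l.foldl (fun (p : List (List Int) × Nat) i => (p.1 ++ [pvRowA i p.2], p.2 + 1)) (acc, t)).1
      = acc ++ pvGo l t := by
  induction l generalizing acc t with
  | nil => simp [pvGo]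
  | cons i is ih => simp [pvGo, ih]

lemma pvGo_length (l : List Int) (t : Nat) : (pvGo l t).length = l.length := by
  induction l generalizing t with
  | nil => rfl
  | cons i is ih => simp [pvGo, ih]

lemma pvGo_getElem (l : List Int) (t k : Nat) (hk : k < l.length) :
    (pvGo l t)[k]'(by rw [pvGo_length]; exact hk) = pvRowA l[k] (t + k) := by
  induction l generalizing t k with
  | nil => simp at hk
  | cons i is ih =>
    cases k with
    | zero => simp [pvGo]
    | succ k =>
      simp only [pvGo, List.getElem_cons_succ]
      rw [ih _ _ (by simpa using hk)]
      congr 1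
      omega

lemma pvRowB_eq (n k : Nat) (hk : k < n) :
    (PySem.List.pyRange 0 ((2 : Int) ^ n) 1).map (fun j =>
        PySem.Int.mod (PySem.Int.floordiv j ((2 : Int) ^ ((n : Int) - 1 - (k : Int)).toNat)) 2)
      = (List.range (2 ^ n)).map (pvG (n - 1 - k)) := by
  have h2 : (2 : Int) ^ n = ((2 ^ n : Nat) : Int) := by push_cast [Nat.cast_pow]; norm_num
  have ht : ((n : Int) - 1 - (k : Int)).toNat = n - 1 - k := by omega
  rw [h2, ht, PySem.List.pyRange_zero_nat, List.map_map]
  apply List.map_congr_left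
  intro j _
  have hp : ((2 : Int) ^ (n - 1 - k)) = ((2 ^ (n - 1 - k) : Nat) : Int) := by push_cast [Nat.cast_pow]; norm_num
  simp only [Function.comp, hp, PySem.Int.floordiv_natCast]
  have : (2 : Int) = ((2 : Nat) : Int) := by norm_num
  rw [this, PySem.Int.mod_natCast]
  rfl

-- ===== VERDICT (by name: the statement is the Claim_ definition above) =====
theorem createStateMatrix_spec : Claim_equal_createStateMatrix := by
  intro matrix _
  unfold Spec_createStateMatrix createStateMatrix createStateMatrix_alt
  rw [pvFoldA, List.nil_append]
  apply List.ext_getElem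
  · simp [pvGo_length, PySem.List.length_pyRange_neg_one]
  · intro k hk hk'
    rw [pvGo_getElem _ _ _ (by simpa [pvGo_length] using hk)]
    have hkn : k < matrix.length := by
      simpa [pvGo_length, PySem.List.length_pyRange_neg_one] using hk
    simp only [List.getElem_map, PySem.List.pyRange_neg_one, List.getElem_range, Nat.zero_add]
    rw [pvRowB_eq matrix.length k hkn]
    have hc : ((matrix.length : Int) - 1 - (k : Int)) = ((matrix.length - 1 - k : Nat) : Int) := by
      omega
    rw [hc, pvRowA_eq]
    have he : matrix.length - 1 - k + 1 + k = matrix.length := by omega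
    rw [he]
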